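-- pv_equiv track=rewrite | github.com/wqjteam/extractandqa | CommonUtil.py | get_first_index_in_array
-- ===== SOURCE A (Python) =====
-- def get_first_index_in_array( be_search_array, target_array):
--     a = be_search_array
--     b = target_array
--     index = 0
--
--     while (index < len(a)):
--         # 当两个数组形式对比的时候，有一个为ndraay 需要用到.all() 如果是两个纯array则不需要
--         if a[index] == b[0] and (index + len(b)) <= len(a) and (a[index:index + len(b)] == b[:]):
--             return index
--         else:
--             index += 1
--     return -1
-- ===== SOURCE B (Python) =====
-- def get_first_index_in_array(be_search_array, target_array):
--     a = be_search_array
--     b = target_array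
--     m = len(b)
--     live = list(range(len(a) - m + 1))
--     for j in range(m):
--         bj = b[j]
--         live = [i for i in live if a[i + j] == bj]
--     return live[0] if live else -1
-- ===== Notes on version B (the rewrite author's own statement) =====
-- stated objective: alternative
-- what changed: B searches pattern-major: it keeps a list of live candidate start positions and filters it once per pattern element, instead of A's text-major scan that slices and compares at every text index.
-- outside the precondition, e.g. on get_first_index_in_array([], []): A returns -1, B returns 0
-- crash fix: On a nonempty be_search_array with an empty target_array A raises IndexError (b[0]); B returns 0, the conventional first occurrence of the empty pattern. — e.g. on get_first_index_in_array([1], []): A raises IndexError, B returns 0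
import Mathlib
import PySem

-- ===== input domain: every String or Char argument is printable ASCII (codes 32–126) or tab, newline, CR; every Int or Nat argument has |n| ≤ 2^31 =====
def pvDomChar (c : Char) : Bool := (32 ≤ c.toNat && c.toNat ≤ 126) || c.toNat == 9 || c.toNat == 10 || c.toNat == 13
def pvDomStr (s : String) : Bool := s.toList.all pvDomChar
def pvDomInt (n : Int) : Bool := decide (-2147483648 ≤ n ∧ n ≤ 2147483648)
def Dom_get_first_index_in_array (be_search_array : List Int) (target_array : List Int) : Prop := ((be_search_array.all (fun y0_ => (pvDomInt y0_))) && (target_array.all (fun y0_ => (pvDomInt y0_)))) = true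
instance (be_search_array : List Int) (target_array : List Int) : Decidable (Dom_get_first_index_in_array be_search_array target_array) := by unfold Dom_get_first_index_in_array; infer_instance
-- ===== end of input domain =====

-- B replaces A's text-major scan (slice-compare at each index) by a pattern-major filter of
-- live candidate start positions; objective: alternative (same asymptotic cost).


-- ===== PORT A =====
-- the while loop: fuel = remaining iterations (a.length - index); pyGetD is exact here since
-- 0 ≤ index < len a at every read reached under Pre_ (b ≠ [] makes b[0] in range)
def goA (a b : List Int) : Nat → Int → Int
  | 0, _ => -1
  | fuel + 1, index =>
    if index < (a.length : Int) then
      if (PySem.List.pyGetD a index 0 == PySem.List.pyGetD b 0 0)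
         && decide (index + (b.length : Int) ≤ (a.length : Int))
         && (PySem.List.slice a (some index) (some (index + (b.length : Int))) == PySem.List.slice b none none)
      then index
      else goA a b fuel (index + 1)
    else -1

def get_first_index_in_array (be_search_array : List Int) (target_array : List Int) : Int :=
  goA be_search_array target_array be_search_array.length 0

-- ===== PORT B =====
def get_first_index_in_array_alt (be_search_array : List Int) (target_array : List Int) : Int :=
  let a := be_search_array
  let b := target_array
  let m : Int := b.length
  let live0 := PySem.List.pyRange 0 ((a.length : Int) - m + 1) 1
  let live := (PySem.List.pyRange 0 m 1).foldl
    (fun live j => live.filter (fun i => PySem.List.pyGetD a (i + j) 0 == PySem.List.pyGetD b j 0)) live0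
  match live with
  | [] => -1
  | i :: _ => i

-- ===== PRECONDITION & SPEC =====
-- Pre_ excludes only target_array = []: there A raises IndexError on b[0] whenever
-- be_search_array ≠ [], and on ([], []) A's -1 is an artefact of the loop never running
-- (B returns 0, the conventional occurrence of the empty pattern).
def Pre_get_first_index_in_array (be_search_array : List Int) (target_array : List Int) : Prop :=
  target_array ≠ []
instance (be_search_array : List Int) (target_array : List Int) : Decidable (Pre_get_first_index_in_array be_search_array target_array) := by unfold Pre_get_first_index_in_array; infer_instance

def pvWitness_get_first_index_in_array : List Int × List Int := ([1, 2, 3], [2, 3])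

-- On a nonempty be_search_array with an empty target_array A raises IndexError (b[0]); B returns 0.
def Raises_get_first_index_in_array (be_search_array : List Int) (target_array : List Int) : Prop :=
  be_search_array ≠ [] ∧ target_array = []
instance (be_search_array : List Int) (target_array : List Int) : Decidable (Raises_get_first_index_in_array be_search_array target_array) := by unfold Raises_get_first_index_in_array; infer_instance
def pvRaiseWitness_get_first_index_in_array : List Int × List Int := ([1], [])
def pvRaiseWitnessOut_get_first_index_in_array : Int := 0

def Spec_get_first_index_in_array (be_search_array : List Int) (target_array : List Int) (out : Int) : Prop := out = get_first_index_in_array_alt be_search_array target_array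
instance (be_search_array : List Int) (target_array : List Int) (out : Int) : Decidable (Spec_get_first_index_in_array be_search_array target_array out) := by unfold Spec_get_first_index_in_array; infer_instance

-- ===== CLAIM (what is proved, stated in full; the proofs are below) =====
def Claim_equal_get_first_index_in_array : Prop := ∀ (be_search_array : List Int) (target_array : List Int), Dom_get_first_index_in_array be_search_array target_array → Pre_get_first_index_in_array be_search_array target_array → Spec_get_first_index_in_array be_search_array target_array (get_first_index_in_array be_search_array target_array)

def Claim_raises_get_first_index_in_array : Prop := (∀ (be_search_array : List Int) (target_array : List Int), Dom_get_first_index_in_array be_search_array target_array → Raises_get_first_index_in_array be_search_array target_array → ¬ Pre_get_first_index_in_array be_search_array target_array) ∧ (Dom_get_first_index_in_array (pvRaiseWitness_get_first_index_in_array.1) (pvRaiseWitness_get_first_index_in_array.2) ∧ Raises_get_first_index_in_array (pvRaiseWitness_get_first_index_in_array.1) (pvRaiseWitness_get_first_index_in_array.2) ∧ get_first_index_in_array_alt (pvRaiseWitness_get_first_index_in_array.1) (pvRaiseWitness_get_first_index_in_array.2) = pvRaiseWitnessOut_get_first_index_in_array)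

-- ===== LEMMAS AND PROOFS =====

def firstOr : List Int → Int
  | [] => -1
  | i :: _ => i

-- A's success condition at index i, as checked (redundant first-element test dropped)
def Qc (a b : List Int) (i : Int) : Bool :=
  decide (i + (b.length : Int) ≤ (a.length : Int))
    && (PySem.List.slice a (some i) (some (i + (b.length : Int))) == b)

-- a fold of filters is one filter by the conjunction
theorem fold_filter (js : List Int) (l0 : List Int) (p : Int → Int → Bool) :
    js.foldl (fun l j => l.filter (fun i => p i j)) l0 = l0.filter (fun i => js.all (p i)) := by
  induction js generalizing l0 with
  | nil => simp
  | cons j js ih =>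
    simp only [List.foldl_cons, ih, List.filter_filter, List.all_cons]
    exact List.filter_congr (fun i _ => by rw [Bool.and_comm])

-- pointwise equality over range = slice equality (Nat form)
theorem ptwise_nat (b a : List Int) (k : Nat) (h : k + b.length ≤ a.length) :
    (List.range b.length).all (fun j => a.getD (k + j) 0 == b.getD j 0)
      = ((a.drop k).take b.length == b) := by
  rw [Bool.eq_iff_iff]
  simp only [List.all_eq_true, List.mem_range, beq_iff_eq]
  constructor
  · intro hp
    apply List.ext_getElem
    · simp; omega
    · intro j hj1 hj2
      have hkj : k + j < a.length := by omega
      have := hp j hj2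
      rw [List.getD_eq_getElem a 0 hkj, List.getD_eq_getElem b 0 hj2] at this
      simpa [List.getElem_take, List.getElem_drop] using this
  · intro he j hj
    have hkj : k + j < a.length := by omega
    have h2 : ((a.drop k).take b.length)[j]'(by simp; omega) = b[j]'hj := by
      simp only [he]
    rw [List.getD_eq_getElem a 0 hkj, List.getD_eq_getElem b 0 hj]
    simpa [List.getElem_take, List.getElem_drop] using h2

-- the same, with B's Int-indexed reads
theorem ptwise_int (a b : List Int) (i : Int) (h0 : 0 ≤ i)
    (hm : i + (b.length : Int) ≤ (a.length : Int)) :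
    ((PySem.List.pyRange 0 (b.length : Int) 1).all
        (fun j => PySem.List.pyGetD a (i + j) 0 == PySem.List.pyGetD b j 0))
      = (PySem.List.slice a (some i) (some (i + (b.length : Int))) == b) := by
  rw [PySem.List.slice_toNat a h0 (by omega)]
  have harg : (i + (b.length : Int)).toNat - i.toNat = b.length := by omega
  rw [harg, ← ptwise_nat b a i.toNat (by omega)]
  rw [PySem.List.pyRange_zero_nat, List.all_map]
  congr 1
  funext j
  dsimp only [Function.comp]
  have : i + ((j : Nat) : Int) = ((i.toNat + j : Nat) : Int) := by omega
  rw [this, PySem.List.pyGetD_natCast, PySem.List.pyGetD_natCast]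

-- A's branch condition equals Qc (the first-element test is implied by the slice test)
theorem cond_eq_Qc (a b : List Int) (hb : b ≠ []) (i : Int) (h0 : 0 ≤ i) :
    ((PySem.List.pyGetD a i 0 == PySem.List.pyGetD b 0 0)
       && decide (i + (b.length : Int) ≤ (a.length : Int))
       && (PySem.List.slice a (some i) (some (i + (b.length : Int))) == PySem.List.slice b none none))
      = Qc a b i := by
  rw [PySem.List.slice_none_none]
  have hm1 : 0 < b.length := List.length_pos_iff.mpr hb
  cases hP2 : decide (i + (b.length : Int) ≤ (a.length : Int)) with
  | false => simp [Qc, hP2]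
  | true =>
    cases hP3 : (PySem.List.slice a (some i) (some (i + (b.length : Int))) == b) with
    | false => simp [Qc, hP2, hP3]
    | true =>
      simp only [Qc, hP2, hP3, Bool.and_true]
      have hmle : i + (b.length : Int) ≤ (a.length : Int) := of_decide_eq_true hP2
      have hin : i < (a.length : Int) := by omega
      have hsl := of_decide_eq_true (by simpa using hP3)
      rw [PySem.List.slice_toNat a h0 (by omega)] at hsl
      have harg : (i + (b.length : Int)).toNat - i.toNat = b.length := by omega
      rw [harg] at hsl
      have hb0 : b[0]'hm1 = ((a.drop i.toNat).take b.length)[0]'(by simp; omega) := by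
        simp only [hsl]
      have e1 := PySem.List.pyGetD_eq_getElem a 0 h0 hin
      rw [e1, PySem.List.pyGetD_zero, List.getD_eq_getElem b 0 hm1]
      simp only [List.getElem_take, List.getElem_drop] at hb0
      simpa using hb0.symm

-- the while loop returns the first index ≥ idx satisfying Qc, else -1
theorem goA_char (a b : List Int) (hb : b ≠ []) :
    ∀ (fuel : Nat) (idx : Int), 0 ≤ idx → (fuel : Int) + idx = (a.length : Int) →
      goA a b fuel idx = firstOr ((PySem.List.pyRange idx (a.length : Int) 1).filter (Qc a b)) := by
  intro fuel
  induction fuel with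
  | zero =>
    intro idx h0 hsum
    rw [PySem.List.pyRange_one_eq_nil (by omega)]
    simp [goA, firstOr]
  | succ fuel ih =>
    intro idx h0 hsum
    have hlt : idx < (a.length : Int) := by
      have : ((fuel + 1 : Nat) : Int) + idx = (a.length : Int) := hsum
      omega
    rw [PySem.List.pyRange_one_cons hlt, List.filter_cons]
    simp only [goA, if_pos hlt, cond_eq_Qc a b hb idx h0]
    cases hq : Qc a b idx with
    | true => simp [firstOr]
    | false =>
      simp only [Bool.false_eq_true, if_false]
      exact ih (idx + 1) (by omega) (by push_cast at hsum ⊢; omega)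

-- Qc is false past the last feasible start
theorem Qc_false_tail (a b : List Int) (i : Int)
    (h : (a.length : Int) - (b.length : Int) + 1 ≤ i) : Qc a b i = false := by
  simp only [Qc, Bool.and_eq_false_iff, decide_eq_false_iff_not]
  left; omega

theorem main_eq (a b : List Int) (hb : b ≠ []) :
    get_first_index_in_array a b = get_first_index_in_array_alt a b := by
  have hm1 : 0 < b.length := List.length_pos_iff.mpr hb
  unfold get_first_index_in_array get_first_index_in_array_alt
  rw [goA_char a b hb a.length 0 le_rfl (by simp)]
  show _ = firstOr _
  rw [fold_filter]
  congr 1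
  by_cases hcase : (a.length : Int) - (b.length : Int) + 1 ≤ 0
  · rw [PySem.List.pyRange_one_eq_nil hcase, List.filter_nil]
    refine List.filter_eq_nil_iff.mpr (fun i hi => ?_)
    rw [PySem.List.mem_pyRange_one] at hi
    simp [Qc_false_tail a b i (by omega)]
  · push Not at hcase
    rw [PySem.List.pyRange_one_append 0 ((a.length : Int) - (b.length : Int) + 1)
      (a.length : Int) (by omega) (by omega), List.filter_append]
    have h2 : (PySem.List.pyRange ((a.length : Int) - (b.length : Int) + 1) (a.length : Int) 1).filter
        (Qc a b) = [] := by
      refine List.filter_eq_nil_iff.mpr (fun i hi => ?_)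
      rw [PySem.List.mem_pyRange_one] at hi
      simp [Qc_false_tail a b i (by omega)]
    rw [h2, List.append_nil]
    refine List.filter_congr (fun i hi => ?_)
    rw [PySem.List.mem_pyRange_one] at hi
    rw [ptwise_int a b i hi.1 (by omega)]
    simp [Qc, show i + (b.length : Int) ≤ (a.length : Int) by omega]

theorem get_first_index_in_array_spec : Claim_equal_get_first_index_in_array := by
  intro a b _ hpre
  unfold Spec_get_first_index_in_array
  exact main_eq a b hpre

-- ===== VERDICT (by name: the statement is the Claim_ definition above) =====
@[simp]
theorem get_first_index_in_array_raises : Claim_raises_get_first_index_in_array := by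
  unfold Claim_raises_get_first_index_in_array
  exact ⟨fun a b _ hr hp => hp hr.2, by decide⟩
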